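-- pv_equiv track=rewrite | github.com/CindyXWu/devinterp-automata | di_automata/tasks/dashiell_groups.py | generate_subgroup
-- ===== SOURCE A (Python) =====
-- from copy import deepcopy
-- from functools import reduce
-- from itertools import product
-- import math
-- from operator import mul
--
-- class DihedralElement:
--     def __init__(self, rot: int, ref: int, n: int):
--         """
--         self.rot: number of times r applied, mod n.
--         self.ref: number of times s applied, mod 2.
--         """
--         self.n = n
--         self.rot = rot % n
--         self.ref = ref % 2
--
--     def __repr__(self):
--         return str((self.rot, self.ref))
--
--     def __hash__(self):
--         return hash(str(self))
--
--     @property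
--     def sigma(self):
--         return self.rot, self.ref
--
--     @classmethod
--     def full_group(cls, n):
--         return [
--             DihedralElement(r, p, n) for r, p in product(range(n), [0, 1])
--         ]
--
--     @property
--     def order(self):
--         if self.ref:
--             return 2
--         elif self.rot == 0:
--             return 0
--         elif (self.n % self.rot) == 0:
--             return self.n // self.rot
--         else:
--             return math.lcm(self.n, self.rot) // self.rot
--
--     @property
--     def inverse(self):
--         if self.ref:
--             return deepcopy(self)
--         else:
--             return DihedralElement(self.n - self.rot, self.ref, self.n)
--
--     def __mul__(self, other):
--         if (not isinstance(other, DihedralElement)) or (other.n != self.n):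
--             raise ValueError(
--                 'Can only multiply a dihedral rotation with another dihedral rotation'
--             )
--         if self.ref:
--             rot = self.rot - other.rot
--         else:
--             rot = self.rot + other.rot
--         return DihedralElement(rot, self.ref + other.ref, self.n)
--
--     def __pow__(self, x: int):
--         if x == -1:
--             return self.inverse
--         elif x == 0:
--             return DihedralElement(0, 0, self.n)
--         elif x == 1:
--             return deepcopy(self)
--         else:
--             return reduce(mul, [deepcopy(self) for _ in range(x)])
--
--     def index(self) -> int:
--         return self.rot * self.ref + self.rot
--
-- def generate_subgroup(generators, n):
--     group_size = 0
--     all_elements = set(generators)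
--     while group_size < len(all_elements):
--         group_size = len(all_elements)
--         rotations = [DihedralElement(*p, n) for p in all_elements]
--         for r1, r2 in product(rotations, repeat=2):
--             r3 = r1 * r2
--             all_elements.add(r3.sigma)
--     return list(all_elements)
-- ===== SOURCE B (Python) =====
-- def _mul(p, q, n):
--     # dihedral product of the (reduced) elements represented by pairs p, q, as a reduced sigma pair
--     r1, f1 = p[0] % n, p[1] % 2
--     r2, f2 = q[0] % n, q[1] % 2
--     r = r1 - r2 if f1 else r1 + r2
--     return (r % n, (f1 + f2) % 2)
--
--
-- def generate_subgroup(generators, n):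
--     # Worklist closure: each element, once discovered, is multiplied by the
--     # generators only — instead of re-multiplying the whole set by itself
--     # round after round.  (Result is returned sorted; the original returns
--     # the elements in arbitrary set order.)
--     seen = set(generators)
--     gens = tuple(seen)
--     stack = list(seen)
--     while stack:
--         x = stack.pop()
--         for g in gens:
--             z = _mul(x, g, n)
--             if z not in seen:
--                 seen.add(z)
--                 stack.append(z)
--     return sorted(seen)
-- ===== Notes on version B (the rewrite author's own statement) =====
-- stated objective: faster
-- what changed: Replaces the repeat-until-fixpoint all-pairs saturation (the whole set re-multiplied by itself every round) with a one-pass worklist closure that multiplies each element exactly once by the deduplicated generators; the element set is identical and is returned sorted (the original returns it in arbitrary Python set order, the return is compared as a set).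
import Mathlib
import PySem

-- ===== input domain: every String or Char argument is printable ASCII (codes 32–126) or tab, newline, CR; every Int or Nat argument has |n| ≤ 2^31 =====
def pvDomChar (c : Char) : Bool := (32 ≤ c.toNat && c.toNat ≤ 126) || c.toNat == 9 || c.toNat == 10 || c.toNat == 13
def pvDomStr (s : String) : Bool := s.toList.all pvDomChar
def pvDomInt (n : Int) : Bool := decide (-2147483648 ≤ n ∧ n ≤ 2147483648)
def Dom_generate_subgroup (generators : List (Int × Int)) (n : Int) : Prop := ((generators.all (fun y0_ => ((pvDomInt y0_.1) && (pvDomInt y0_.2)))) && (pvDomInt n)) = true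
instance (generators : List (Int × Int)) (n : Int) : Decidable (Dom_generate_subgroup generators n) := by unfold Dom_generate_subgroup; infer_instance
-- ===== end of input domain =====

-- B replaces A's repeat-until-fixpoint all-pairs saturation by a worklist closure that
-- multiplies each discovered element once by the deduplicated generators (objective: faster).
-- Python A returns list(set(...)) in arbitrary hash order; the return value is compared as a
-- set, and both ports return the elements sorted (Python tuple order).

-- ===== PORT A =====
-- sigma of DihedralElement(*p, n) * DihedralElement(*q, n):
-- each factor is reduced on construction (rot % n, ref % 2); `if self.ref:` tests ref == 1.
def dihMulA (n : Int) (p q : Int × Int) : Int × Int :=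
  (PySem.Int.mod
      (if PySem.Int.mod p.2 2 = 1
        then PySem.Int.mod p.1 n - PySem.Int.mod q.1 n
        else PySem.Int.mod p.1 n + PySem.Int.mod q.1 n) n,
   PySem.Int.mod (PySem.Int.mod p.2 2 + PySem.Int.mod q.2 2) 2)

-- one pass of the while-body: add sigma(r1*r2) for every pair of the current set
-- (Python iterates the set in hash order; only the resulting SET is used, so the order is immaterial)
def stepA (n : Int) (s : PySem.Set (Int × Int)) : PySem.Set (Int × Int) :=
  List.foldl (fun acc p => List.foldl (fun acc2 q => PySem.Set.add acc2 (dihMulA n p q)) acc s) s s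

-- `while group_size < len(all_elements)`; fuel bounds the number of rounds: the set size
-- strictly increases each round and never exceeds len(generators) + 2*|n|, so the fuel
-- provided by generate_subgroup is provably sufficient (loopA_spec below).
def loopA (n : Int) (fuel : Nat) (gs : Int) (s : PySem.Set (Int × Int)) : PySem.Set (Int × Int) :=
  match fuel with
  | 0 => s
  | fuel + 1 =>
      if gs < PySem.Set.len s then loopA n fuel (PySem.Set.len s) (stepA n s) else s

def generate_subgroup (generators : List (Int × Int)) (n : Int) : List (Int × Int) :=
  -- all_elements = set(generators); group_size = 0; while-loop; return list(all_elements)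
  -- list(all_elements) is in unspecified hash order (compared as a set): the port returns
  -- the elements sorted by Python tuple order.
  let s := PySem.Set.ofList generators
  PySem.List.sorted2 (loopA n (generators.length + 2 * n.natAbs + 1) 0 s) Prod.fst Prod.snd

-- ===== PORT B =====
-- _mul(p, q, n) of Source B
def dihMulB (n : Int) (p q : Int × Int) : Int × Int :=
  (PySem.Int.mod
      (if PySem.Int.mod p.2 2 = 1
        then PySem.Int.mod p.1 n - PySem.Int.mod q.1 n
        else PySem.Int.mod p.1 n + PySem.Int.mod q.1 n) n,
   PySem.Int.mod (PySem.Int.mod p.2 2 + PySem.Int.mod q.2 2) 2)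

-- inner `for g in gens:` of one while-iteration: state = (stack, seen)
def stepB (n : Int) (gens : List (Int × Int)) (x : Int × Int)
    (st : List (Int × Int)) (sn : PySem.Set (Int × Int)) :
    List (Int × Int) × PySem.Set (Int × Int) :=
  List.foldl
    (fun acc g =>
      let z := dihMulB n x g
      if PySem.Set.contains acc.2 z then acc else (z :: acc.1, PySem.Set.add acc.2 z))
    (st, sn) gens

-- `while stack:` — the Python stack pushes/pops at the tail (LIFO); the port keeps the same
-- LIFO stack with its top at the head.  Fuel bounds the number of pops: every element is
-- pushed at most once and the set size is bounded as for loopA (loopB_spec below).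
def loopB (n : Int) (gens : List (Int × Int)) (fuel : Nat)
    (stack : List (Int × Int)) (seen : PySem.Set (Int × Int)) : PySem.Set (Int × Int) :=
  match fuel, stack with
  | 0, _ => seen
  | _ + 1, [] => seen
  | fuel + 1, x :: rest =>
      let r := stepB n gens x rest seen
      loopB n gens fuel r.1 r.2

def generate_subgroup_alt (generators : List (Int × Int)) (n : Int) : List (Int × Int) :=
  -- seen = set(generators); gens = tuple(seen); stack = list(seen); while-loop; return sorted(seen)
  let seen := PySem.Set.ofList generators
  PySem.List.sorted2 (loopB n seen (generators.length + 2 * n.natAbs + 1) seen seen)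
    Prod.fst Prod.snd

-- ===== PRECONDITION & SPEC =====
-- Pre_ excludes exactly the inputs on which A raises: n = 0 with a nonempty generator list
-- makes `rot % n` raise ZeroDivisionError (B raises there too).
def Pre_generate_subgroup (generators : List (Int × Int)) (n : Int) : Prop :=
  generators = [] ∨ n ≠ 0
instance (generators : List (Int × Int)) (n : Int) : Decidable (Pre_generate_subgroup generators n) := by
  unfold Pre_generate_subgroup; infer_instance

def pvWitness_generate_subgroup : (List (Int × Int)) × Int := ([(1, 0), (0, 1)], 3)

def Spec_generate_subgroup (generators : List (Int × Int)) (n : Int) (out : List (Int × Int)) : Prop :=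
  out = generate_subgroup_alt generators n
instance (generators : List (Int × Int)) (n : Int) (out : List (Int × Int)) : Decidable (Spec_generate_subgroup generators n out) := by
  unfold Spec_generate_subgroup; infer_instance

-- ===== CLAIM (what is proved, stated in full; the proofs are below) =====
def Claim_equal_generate_subgroup : Prop :=
  ∀ (generators : List (Int × Int)) (n : Int), Dom_generate_subgroup generators n →
    Pre_generate_subgroup generators n →
    Spec_generate_subgroup generators n (generate_subgroup generators n)

-- ===== LEMMAS AND PROOFS =====

-- ---- Python-mod congruences (PySem.Int.mod a b = Int.fmod a b) ----
theorem pmod_sub_self_dvd (a n : Int) : n ∣ (PySem.Int.mod a n - a) := by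
  refine ⟨-(PySem.Int.floordiv a n), ?_⟩
  have h := PySem.Int.floordiv_mul_add_mod a n
  linear_combination h

theorem pmod_congr {a b n : Int} (h : n ∣ (a - b)) :
    PySem.Int.mod a n = PySem.Int.mod b n := by
  obtain ⟨k, hk⟩ := h
  have ha : a = b + n * k := by linarith
  subst ha
  exact Int.add_mul_fmod_self_left b n k

theorem pmod_add_left (a b n : Int) :
    PySem.Int.mod (PySem.Int.mod a n + b) n = PySem.Int.mod (a + b) n := by
  refine pmod_congr ?_
  have := pmod_sub_self_dvd a n
  have heq : PySem.Int.mod a n + b - (a + b) = PySem.Int.mod a n - a := by ring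
  rw [heq]; exact this

theorem pmod_add_right (a b n : Int) :
    PySem.Int.mod (a + PySem.Int.mod b n) n = PySem.Int.mod (a + b) n := by
  refine pmod_congr ?_
  have := pmod_sub_self_dvd b n
  have heq : a + PySem.Int.mod b n - (a + b) = PySem.Int.mod b n - b := by ring
  rw [heq]; exact this

theorem pmod_sub_left (a b n : Int) :
    PySem.Int.mod (PySem.Int.mod a n - b) n = PySem.Int.mod (a - b) n := by
  refine pmod_congr ?_
  have := pmod_sub_self_dvd a n
  have heq : PySem.Int.mod a n - b - (a - b) = PySem.Int.mod a n - a := by ring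
  rw [heq]; exact this

theorem pmod_sub_right (a b n : Int) :
    PySem.Int.mod (a - PySem.Int.mod b n) n = PySem.Int.mod (a - b) n := by
  refine pmod_congr ?_
  have := pmod_sub_self_dvd b n
  have heq : a - PySem.Int.mod b n - (a - b) = -(PySem.Int.mod b n - b) := by ring
  rw [heq]; exact (pmod_sub_self_dvd b n).neg_right

theorem dihMulB_eq_dihMulA : dihMulB = dihMulA := rfl

-- the reduction performed on construction of the factors can be pushed inward
theorem dih_eval (n : Int) (p q : Int × Int) :
    dihMulA n p q =
      (PySem.Int.mod (if PySem.Int.mod p.2 2 = 1 then p.1 - q.1 else p.1 + q.1) n,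
       PySem.Int.mod (p.2 + q.2) 2) := by
  unfold dihMulA
  rw [Prod.mk.injEq]
  refine ⟨?_, by rw [pmod_add_left, pmod_add_right]⟩
  by_cases h : PySem.Int.mod p.2 2 = 1
  · rw [if_pos h, if_pos h, pmod_sub_left, pmod_sub_right]
  · rw [if_neg h, if_neg h, pmod_add_left, pmod_add_right]

theorem parity_add (a b : Int) :
    PySem.Int.mod (PySem.Int.mod a 2 + PySem.Int.mod b 2) 2 = PySem.Int.mod (a + b) 2 := by
  rw [pmod_add_left, pmod_add_right]

theorem dih_assoc (n : Int) (p q r : Int × Int) :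
    dihMulA n (dihMulA n p q) r = dihMulA n p (dihMulA n q r) := by
  simp only [dih_eval]
  rw [Prod.mk.injEq]
  refine ⟨?_, by rw [pmod_add_left, pmod_add_right, add_assoc]⟩
  have hcong : ∀ x y : Int, x = y → PySem.Int.mod x n = PySem.Int.mod y n :=
    fun x y h => by rw [h]
  rcases PySem.Int.mod_two_eq p.2 with hp | hp <;>
    rcases PySem.Int.mod_two_eq q.2 with hq | hq
  all_goals have dec0 : ¬ ((0:Int) = 1) := by decide
  all_goals have dec1 : ((1:Int) = 1) := rfl
  all_goals have m0 : PySem.Int.mod (0:Int) 2 = 0 := by decide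
  all_goals have m1 : PySem.Int.mod (1:Int) 2 = 1 := by decide
  · have hpq : PySem.Int.mod (p.2 + q.2) 2 = 0 := by rw [← parity_add, hp, hq]; decide
    rw [hpq, hp, hq, m0, if_neg dec0, if_neg dec0, if_neg dec0, if_neg dec0,
      pmod_add_left, pmod_add_right, add_assoc]
  · have hpq : PySem.Int.mod (p.2 + q.2) 2 = 1 := by rw [← parity_add, hp, hq]; decide
    rw [hpq, hp, hq, m1, if_pos dec1, if_neg dec0, if_neg dec0, if_pos dec1,
      pmod_sub_left, pmod_add_right]
    exact hcong _ _ (by ring)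
  · have hpq : PySem.Int.mod (p.2 + q.2) 2 = 1 := by rw [← parity_add, hp, hq]; decide
    rw [hpq, hp, hq, m1, if_pos dec1, if_pos dec1, if_pos dec1, if_neg dec0,
      pmod_sub_left, pmod_sub_right]
    exact hcong _ _ (by ring)
  · have hpq : PySem.Int.mod (p.2 + q.2) 2 = 0 := by rw [← parity_add, hp, hq]; decide
    rw [hpq, hp, hq, m0, if_neg dec0, if_pos dec1, if_pos dec1, if_pos dec1,
      pmod_add_left, pmod_sub_right]
    exact hcong _ _ (by ring)

-- ---- generic foldl-over-Set lemmas ----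
theorem mem_foldl_iff {α β : Type} [BEq β] [LawfulBEq β]
    (F : PySem.Set β → α → PySem.Set β) (C : α → β → Prop)
    (h : ∀ acc p y, y ∈ F acc p ↔ y ∈ acc ∨ C p y) :
    ∀ (l : List α) (acc : PySem.Set β) (y : β),
      y ∈ List.foldl F acc l ↔ y ∈ acc ∨ ∃ p ∈ l, C p y := by
  intro l
  induction l with
  | nil => simp
  | cons a l ih =>
      intro acc y
      simp only [List.foldl_cons, ih, h, List.mem_cons]
      constructor
      · rintro ((hy | hy) | ⟨p, hp, hC⟩)
        · exact Or.inl hy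
        · exact Or.inr ⟨a, Or.inl rfl, hy⟩
        · exact Or.inr ⟨p, Or.inr hp, hC⟩
      · rintro (hy | ⟨p, (rfl | hp), hC⟩)
        · exact Or.inl (Or.inl hy)
        · exact Or.inl (Or.inr hC)
        · exact Or.inr ⟨p, hp, hC⟩

theorem nodup_foldl {α β : Type} (F : List β → α → List β)
    (h : ∀ acc x, acc.Nodup → (F acc x).Nodup) :
    ∀ (l : List α) (acc : List β), acc.Nodup → (List.foldl F acc l).Nodup := by
  intro l
  induction l with
  | nil => simpa using fun acc h' => h'
  | cons a l ih => intro acc hacc; exact ih _ (h _ _ hacc)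

-- ---- stepA characterisation ----
theorem mem_stepA (n : Int) (s : PySem.Set (Int × Int)) (y : Int × Int) :
    y ∈ stepA n s ↔ y ∈ s ∨ ∃ p ∈ s, ∃ q ∈ s, y = dihMulA n p q := by
  unfold stepA
  exact mem_foldl_iff _ (fun p y => ∃ q ∈ s, y = dihMulA n p q)
    (fun acc p y => mem_foldl_iff _ (fun q y => y = dihMulA n p q)
      (fun acc2 q y => PySem.Set.mem_add acc2 _ y) s acc y) s s y

theorem nodup_stepA (n : Int) (s : PySem.Set (Int × Int)) (hs : s.Nodup) :
    (stepA n s).Nodup := by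
  unfold stepA
  exact nodup_foldl _
    (fun acc p hacc => nodup_foldl _ (fun a2 q h2 => PySem.Set.nodup_add a2 _ h2) s acc hacc) s s hs

-- ---- products of ≥ 2 generators ----
inductive Prod2 (S : List (Int × Int)) (n : Int) : (Int × Int) → Prop where
  | two : ∀ {a b : Int × Int}, a ∈ S → b ∈ S → Prod2 S n (dihMulA n a b)
  | snoc : ∀ {x g : Int × Int}, Prod2 S n x → g ∈ S → Prod2 S n (dihMulA n x g)

theorem prod2_shape {S : List (Int × Int)} {n : Int} {x : Int × Int}
    (h : Prod2 S n x) : ∃ p q, x = dihMulA n p q := by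
  cases h with
  | two ha hb => exact ⟨_, _, rfl⟩
  | snoc hx hg => exact ⟨_, _, rfl⟩

theorem prod2_mul_right {S : List (Int × Int)} {n : Int} {p q : Int × Int}
    (hp : p ∈ S ∨ Prod2 S n p) (hq : Prod2 S n q) : Prod2 S n (dihMulA n p q) := by
  induction hq with
  | two ha hb =>
      rw [← dih_assoc]
      rcases hp with hp | hp
      · exact Prod2.snoc (Prod2.two hp ha) hb
      · exact Prod2.snoc (Prod2.snoc hp ha) hb
  | snoc hx hg ih =>
      rw [← dih_assoc]
      exact Prod2.snoc ih hg

theorem sp_closed {S : List (Int × Int)} {n : Int} {p q : Int × Int}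
    (hp : p ∈ S ∨ Prod2 S n p) (hq : q ∈ S ∨ Prod2 S n q) :
    Prod2 S n (dihMulA n p q) := by
  rcases hq with hq | hq
  · rcases hp with hp | hp
    · exact Prod2.two hp hq
    · exact Prod2.snoc hp hq
  · exact prod2_mul_right hp hq

-- ---- size bound ----
-- every value dihMulA can produce lies in a fixed list of 2*|n| reduced pairs
def univList (n : Int) : List (Int × Int) :=
  (List.range (2 * n.natAbs)).map (fun k =>
    ((if 0 < n then 0 else n + 1) + ((k / 2 : Nat) : Int), ((k % 2 : Nat) : Int)))

theorem mem_univList {n : Int} (hn : n ≠ 0) {x : Int × Int}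
    (h1 : (if 0 < n then 0 else n + 1) ≤ x.1 ∧
          x.1 < (if 0 < n then 0 else n + 1) + (n.natAbs : Int))
    (h2 : x.2 = 0 ∨ x.2 = 1) : x ∈ univList n := by
  set lo : Int := if 0 < n then 0 else n + 1 with hlo
  refine List.mem_map.mpr ⟨(x.1 - lo).toNat * 2 + x.2.toNat, List.mem_range.mpr ?_, ?_⟩
  · omega
  · have e1 : (((x.1 - lo).toNat * 2 + x.2.toNat) / 2 : Nat) = (x.1 - lo).toNat := by omega
    have e2 : (((x.1 - lo).toNat * 2 + x.2.toNat) % 2 : Nat) = x.2.toNat := by omega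
    rw [e1, e2]
    obtain ⟨a, b⟩ := x
    simp only at h1 h2 ⊢
    rw [Prod.mk.injEq]
    constructor <;> push_cast <;> omega

theorem length_univList (n : Int) : (univList n).length = 2 * n.natAbs := by
  simp [univList]

theorem dihMulA_mem_univ {n : Int} (hn : n ≠ 0) (p q : Int × Int) :
    dihMulA n p q ∈ univList n := by
  refine mem_univList hn ?_ ?_
  · show (if 0 < n then 0 else n + 1) ≤ PySem.Int.mod _ n ∧
      PySem.Int.mod _ n < (if 0 < n then 0 else n + 1) + (n.natAbs : Int)
    rcases lt_or_gt_of_ne hn with h | h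
    · have := PySem.Int.mod_neg_bounds
        ((if PySem.Int.mod p.2 2 = 1
          then PySem.Int.mod p.1 n - PySem.Int.mod q.1 n
          else PySem.Int.mod p.1 n + PySem.Int.mod q.1 n)) h
      rw [if_neg (by omega)]
      omega
    · have ha := PySem.Int.mod_nonneg
        ((if PySem.Int.mod p.2 2 = 1
          then PySem.Int.mod p.1 n - PySem.Int.mod q.1 n
          else PySem.Int.mod p.1 n + PySem.Int.mod q.1 n)) h
      have hb := PySem.Int.mod_lt
        ((if PySem.Int.mod p.2 2 = 1
          then PySem.Int.mod p.1 n - PySem.Int.mod q.1 n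
          else PySem.Int.mod p.1 n + PySem.Int.mod q.1 n)) h
      rw [if_pos h]
      omega
  · exact PySem.Int.mod_two_eq _

theorem nodup_len_le {s t : List (Int × Int)} (hs : s.Nodup)
    (hsub : ∀ x ∈ s, x ∈ t) : s.length ≤ t.length := by
  have h1 : s.toFinset ⊆ t.toFinset := by
    intro x hx; rw [List.mem_toFinset] at *; exact hsub x hx
  have h2 : s.toFinset.card = s.length := List.toFinset_card_of_nodup hs
  have := Finset.card_le_card h1
  have h3 : t.toFinset.card ≤ t.length := t.toFinset_card_le
  omega

theorem size_bound {S : List (Int × Int)} {n : Int} (hn : n ≠ 0)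
    {s : List (Int × Int)} (hnd : s.Nodup)
    (hsub : ∀ x ∈ s, x ∈ S ∨ Prod2 S n x) :
    (s.length : Int) ≤ (S.length : Int) + 2 * n.natAbs := by
  have h : ∀ x ∈ s, x ∈ S ++ univList n := by
    intro x hx
    rcases hsub x hx with h | h
    · exact List.mem_append_left _ h
    · obtain ⟨p, q, rfl⟩ := prod2_shape h
      exact List.mem_append_right _ (dihMulA_mem_univ hn p q)
  have := nodup_len_le hnd h
  rw [List.length_append, length_univList] at this
  omega

-- ---- loopA ----
def InvA (S : List (Int × Int)) (n : Int) (s : List (Int × Int)) : Prop :=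
  s.Nodup ∧ (∀ x ∈ S, x ∈ s) ∧ (∀ x ∈ s, x ∈ S ∨ Prod2 S n x)

theorem stepA_mono {n : Int} {s : PySem.Set (Int × Int)} {y : Int × Int}
    (h : y ∈ s) : y ∈ stepA n s := (mem_stepA n s y).mpr (Or.inl h)

theorem stepA_invA {S : List (Int × Int)} {n : Int} {s : List (Int × Int)}
    (h : InvA S n s) : InvA S n (stepA n s) := by
  obtain ⟨hnd, hseed, hsub⟩ := h
  refine ⟨nodup_stepA n s hnd, fun x hx => stepA_mono (hseed x hx), fun x hx => ?_⟩
  rcases (mem_stepA n s x).mp hx with h | ⟨p, hp, q, hq, rfl⟩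
  · exact hsub x h
  · exact Or.inr (sp_closed (hsub p hp) (hsub q hq))

theorem mem_iff_of_sub_of_len {s t : List (Int × Int)} (hs : s.Nodup) (ht : t.Nodup)
    (hsub : ∀ x ∈ s, x ∈ t) (hlen : t.length ≤ s.length) : ∀ x, x ∈ t ↔ x ∈ s := by
  have h1 : s.toFinset ⊆ t.toFinset := by
    intro x hx; rw [List.mem_toFinset] at *; exact hsub x hx
  have h2 : s.toFinset = t.toFinset := by
    refine Finset.eq_of_subset_of_card_le h1 ?_
    rw [List.toFinset_card_of_nodup hs, List.toFinset_card_of_nodup ht]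
    exact hlen
  intro x
  constructor <;> intro hx
  · have : x ∈ s.toFinset := h2 ▸ List.mem_toFinset.mpr hx
    rwa [List.mem_toFinset] at this
  · exact hsub x hx

theorem loopA_spec {S : List (Int × Int)} {n : Int} (hn : n ≠ 0) :
    ∀ (fuel : Nat) (gs : Int) (s : PySem.Set (Int × Int)), InvA S n s →
      gs ≤ (s.length : Int) →
      (¬ gs < (s.length : Int) → ∀ p ∈ s, ∀ q ∈ s, dihMulA n p q ∈ s) →
      ((S.length : Int) + 2 * n.natAbs < gs + fuel) →
      InvA S n (loopA n fuel gs s) ∧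
        (∀ p ∈ loopA n fuel gs s, ∀ q ∈ loopA n fuel gs s,
          dihMulA n p q ∈ loopA n fuel gs s) := by
  intro fuel
  induction fuel with
  | zero =>
      intro gs s hinv hgs hexit hfuel
      exfalso
      have := size_bound hn hinv.1 hinv.2.2
      omega
  | succ fuel ih =>
      intro gs s hinv hgs hexit hfuel
      simp only [loopA, PySem.Set.len] at *
      by_cases h : gs < (s.length : Int)
      · rw [if_pos h]
        have hsub : ∀ x ∈ s, x ∈ stepA n s := fun x hx => stepA_mono hx
        have hlen : ((s.length : Int)) ≤ ((stepA n s).length : Int) := by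
          exact_mod_cast nodup_len_le hinv.1 hsub
        refine ih (s.length : Int) (stepA n s) (stepA_invA hinv) hlen ?_ ?_
        · intro hno p hp q hq
          have hle : (stepA n s).length ≤ s.length := by exact_mod_cast not_lt.mp hno
          have hmem := mem_iff_of_sub_of_len hinv.1 (nodup_stepA n s hinv.1) hsub hle
          exact (mem_stepA n s _).mpr
            (Or.inr ⟨p, (hmem p).mp hp, q, (hmem q).mp hq, rfl⟩)
        · push_cast at hfuel ⊢
          omega
      · rw [if_neg h]
        exact ⟨hinv, hexit h⟩

-- ---- stepB characterisation ----
theorem len_set_add_of_not_mem {s : PySem.Set (Int × Int)} {z : Int × Int}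
    (h : ¬ PySem.Set.contains s z) : (PySem.Set.add s z).length = s.length + 1 := by
  have h' : z ∉ s := by simpa [PySem.Set.contains] using h
  simp [PySem.Set.add, PySem.Set.contains, h']

theorem not_mem_of_not_contains {s : PySem.Set (Int × Int)} {z : Int × Int}
    (h : ¬ PySem.Set.contains s z = true) : z ∉ s := by
  simp [PySem.Set.contains] at h
  exact h

theorem mem_set_add_self (s : PySem.Set (Int × Int)) (z : Int × Int) : z ∈ PySem.Set.add s z :=
  (PySem.Set.mem_add s z z).mpr (Or.inr rfl)

theorem stepB_cons_of_contains {n : Int} {g : Int × Int} {gens : List (Int × Int)}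
    {x : Int × Int} {st : List (Int × Int)} {sn : PySem.Set (Int × Int)}
    (hc : PySem.Set.contains sn (dihMulB n x g)) :
    stepB n (g :: gens) x st sn = stepB n gens x st sn := by
  simp only [stepB, List.foldl_cons]
  rw [if_pos hc]

theorem stepB_cons_of_not_contains {n : Int} {g : Int × Int} {gens : List (Int × Int)}
    {x : Int × Int} {st : List (Int × Int)} {sn : PySem.Set (Int × Int)}
    (hc : ¬ PySem.Set.contains sn (dihMulB n x g)) :
    stepB n (g :: gens) x st sn
      = stepB n gens x ((dihMulB n x g) :: st) (PySem.Set.add sn (dihMulB n x g)) := by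
  simp only [stepB, List.foldl_cons]
  rw [if_neg hc]

theorem stepB_spec (n : Int) (x : Int × Int) :
    ∀ (gens : List (Int × Int)) (st : List (Int × Int)) (sn : PySem.Set (Int × Int)),
      sn.Nodup → st.Nodup → (∀ y ∈ st, y ∈ sn) →
      ((∀ y ∈ sn, y ∈ (stepB n gens x st sn).2) ∧
        (∀ y, y ∈ (stepB n gens x st sn).2 ↔ y ∈ sn ∨ ∃ g ∈ gens, y = dihMulA n x g) ∧
        (∀ y, y ∈ (stepB n gens x st sn).1 ↔
          y ∈ st ∨ (y ∈ (stepB n gens x st sn).2 ∧ y ∉ sn)) ∧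
        (stepB n gens x st sn).2.Nodup ∧ (stepB n gens x st sn).1.Nodup ∧
        (∀ y ∈ (stepB n gens x st sn).1, y ∈ (stepB n gens x st sn).2) ∧
        (((stepB n gens x st sn).2.length : Int) - (stepB n gens x st sn).1.length
          = (sn.length : Int) - st.length)) := by
  intro gens
  induction gens with
  | nil =>
      intro st sn h1 h2 h3
      exact ⟨fun y hy => hy, by simp [stepB], by simp [stepB], h1, h2, h3, rfl⟩
  | cons g gens ih =>
      intro st sn h1 h2 h3
      by_cases hc : PySem.Set.contains sn (dihMulB n x g)
      · rw [stepB_cons_of_contains hc]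
        obtain ⟨c1, c2, c3, c4, c5, c6, c7⟩ := ih st sn h1 h2 h3
        have hzin : dihMulB n x g ∈ sn := by
          simpa [PySem.Set.contains] using hc
        refine ⟨c1, fun y => ?_, c3, c4, c5, c6, c7⟩
        rw [c2]
        constructor
        · rintro (h | ⟨g', hg', rfl⟩)
          · exact Or.inl h
          · exact Or.inr ⟨g', List.mem_cons_of_mem _ hg', rfl⟩
        · rintro (h | ⟨g', hg', rfl⟩)
          · exact Or.inl h
          · rcases List.mem_cons.mp hg' with rfl | hg'
            · exact Or.inl (by rw [dihMulB_eq_dihMulA] at hzin; exact hzin)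
            · exact Or.inr ⟨g', hg', rfl⟩
      · rw [stepB_cons_of_not_contains hc]
        have hznotin : dihMulB n x g ∉ sn := not_mem_of_not_contains hc
        have h1' : (PySem.Set.add sn (dihMulB n x g)).Nodup := PySem.Set.nodup_add _ _ h1
        have h2' : ((dihMulB n x g) :: st).Nodup :=
          List.nodup_cons.mpr ⟨fun hz => hznotin (h3 _ hz), h2⟩
        have h3' : ∀ y ∈ (dihMulB n x g) :: st, y ∈ PySem.Set.add sn (dihMulB n x g) := by
          intro y hy
          rcases List.mem_cons.mp hy with rfl | hy
          · exact mem_set_add_self _ _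
          · exact (PySem.Set.mem_add _ _ _).mpr (Or.inl (h3 _ hy))
        obtain ⟨c1, c2, c3, c4, c5, c6, c7⟩ := ih _ _ h1' h2' h3'
        have hadd : ∀ y, y ∈ PySem.Set.add sn (dihMulB n x g) ↔ y ∈ sn ∨ y = dihMulB n x g :=
          fun y => PySem.Set.mem_add sn _ y
        have hz2 : dihMulB n x g
            ∈ (stepB n gens x ((dihMulB n x g) :: st) (PySem.Set.add sn (dihMulB n x g))).2 :=
          c1 _ (mem_set_add_self _ _)
        refine ⟨fun y hy => c1 y ((hadd y).mpr (Or.inl hy)), fun y => ?_, fun y => ?_,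
          c4, c5, c6, ?_⟩
        · rw [c2, hadd, dihMulB_eq_dihMulA]
          constructor
          · rintro ((h | h) | ⟨g', hg', rfl⟩)
            · exact Or.inl h
            · exact Or.inr ⟨g, List.mem_cons_self, h⟩
            · exact Or.inr ⟨g', List.mem_cons_of_mem _ hg', rfl⟩
          · rintro (h | ⟨g', hg', rfl⟩)
            · exact Or.inl (Or.inl h)
            · rcases List.mem_cons.mp hg' with rfl | hg'
              · exact Or.inl (Or.inr rfl)
              · exact Or.inr ⟨g', hg', rfl⟩
        · rw [c3]
          constructor
          · rintro (hy | ⟨hy2, hyn⟩)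
            · rcases List.mem_cons.mp hy with rfl | hy
              · exact Or.inr ⟨hz2, hznotin⟩
              · exact Or.inl hy
            · refine Or.inr ⟨hy2, fun hyn' => hyn ((hadd y).mpr (Or.inl hyn'))⟩
          · rintro (hy | ⟨hy2, hyn⟩)
            · exact Or.inl (List.mem_cons_of_mem _ hy)
            · by_cases hyz : y = dihMulB n x g
              · subst hyz; exact Or.inl List.mem_cons_self
              · refine Or.inr ⟨hy2, fun hmem => ?_⟩
                rcases (hadd y).mp hmem with h | h
                · exact hyn h
                · exact hyz h
        · have hlen := len_set_add_of_not_mem hc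
          have hlen2 : ((dihMulB n x g) :: st).length = st.length + 1 := rfl
          omega

-- ---- loopB ----
theorem loopB_succ_nil (n : Int) (gens : List (Int × Int)) (m : Nat)
    (seen : PySem.Set (Int × Int)) : loopB n gens (m + 1) [] seen = seen := rfl

theorem loopB_succ_cons (n : Int) (gens : List (Int × Int)) (m : Nat) (x : Int × Int)
    (rest : List (Int × Int)) (seen : PySem.Set (Int × Int)) :
    loopB n gens (m + 1) (x :: rest) seen
      = loopB n gens m (stepB n gens x rest seen).1 (stepB n gens x rest seen).2 := rfl

def InvB (S : List (Int × Int)) (n : Int)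
    (stack : List (Int × Int)) (seen : List (Int × Int)) : Prop :=
  seen.Nodup ∧ stack.Nodup ∧ (∀ y ∈ stack, y ∈ seen) ∧ (∀ x ∈ S, x ∈ seen) ∧
    (∀ x ∈ seen, x ∈ S ∨ Prod2 S n x) ∧
    (∀ x ∈ seen, x ∉ stack → ∀ g ∈ PySem.Set.ofList S, dihMulA n x g ∈ seen)

theorem loopB_spec {S : List (Int × Int)} {n : Int} (hn : n ≠ 0) :
    ∀ (fuel : Nat) (stack : List (Int × Int)) (seen : PySem.Set (Int × Int)),
      InvB S n stack seen →
      ((S.length : Int) + 2 * n.natAbs < (seen.length : Int) - stack.length + fuel) →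
      ((loopB n (PySem.Set.ofList S) fuel stack seen).Nodup ∧
        (∀ x ∈ S, x ∈ loopB n (PySem.Set.ofList S) fuel stack seen) ∧
        (∀ x ∈ loopB n (PySem.Set.ofList S) fuel stack seen, x ∈ S ∨ Prod2 S n x) ∧
        (∀ x ∈ loopB n (PySem.Set.ofList S) fuel stack seen,
          ∀ g ∈ PySem.Set.ofList S, dihMulA n x g
            ∈ loopB n (PySem.Set.ofList S) fuel stack seen)) := by
  intro fuel
  induction fuel with
  | zero =>
      intro stack seen hinv hfuel
      exfalso
      obtain ⟨h1, h2, h3, _, h5, _⟩ := hinv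
      have hb := size_bound hn h1 h5
      have hst : stack.length ≤ seen.length := nodup_len_le h2 h3
      push_cast at hfuel hb
      omega
  | succ fuel ih =>
      intro stack seen hinv hfuel
      obtain ⟨h1, h2, h3, h4, h5, h6⟩ := hinv
      match stack with
      | [] =>
          rw [loopB_succ_nil]
          exact ⟨h1, h4, h5, fun x hx g hg => h6 x hx (by simp) g hg⟩
      | x :: rest =>
          rw [loopB_succ_cons]
          have hxseen : x ∈ seen := h3 x List.mem_cons_self
          obtain ⟨c1, c2, c3, c4, c5, c6, c7⟩ :=
            stepB_spec n x (PySem.Set.ofList S) rest seen h1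
              (List.nodup_cons.mp h2).2 (fun y hy => h3 y (List.mem_cons_of_mem _ hy))
          refine ih _ _ ⟨c4, c5, c6, fun y hy => c1 y (h4 y hy), ?_, ?_⟩ ?_
          · -- every member of the new seen is a seed or a product
            intro y hy
            rcases (c2 y).mp hy with hy | ⟨g, hg, rfl⟩
            · exact h5 y hy
            · have hgS : g ∈ S := (PySem.Set.mem_ofList S g).mp hg
              rcases h5 x hxseen with hx | hx
              · exact Or.inr (Prod2.two hx hgS)
              · exact Or.inr (Prod2.snoc hx hgS)
          · -- processed elements are closed under right-multiplication by the generators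
            intro y hy hynot g hg
            have hynrest : y ∉ rest := fun hr => hynot ((c3 y).mpr (Or.inl hr))
            have hyseen : y ∈ seen := by
              by_contra hns
              exact hynot ((c3 y).mpr (Or.inr ⟨hy, hns⟩))
            by_cases hyx : y = x
            · subst hyx
              exact (c2 (dihMulA n y g)).mpr (Or.inr ⟨g, hg, rfl⟩)
            · have hnotin : y ∉ x :: rest := by
                intro hm; rcases List.mem_cons.mp hm with h | h
                · exact hyx h
                · exact hynrest h
              exact c1 _ (h6 y hyseen hnotin g hg)
          · have hlen : (rest.length : Int) = ((x :: rest).length : Int) - 1 := by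
              simp
            push_cast at hfuel ⊢
            omega


-- ---- characterisation of both results ----
theorem memR_iff {S : List (Int × Int)} {n : Int} {R : List (Int × Int)}
    (hseed : ∀ x ∈ S, x ∈ R) (hsub : ∀ x ∈ R, x ∈ S ∨ Prod2 S n x)
    (hclosed : ∀ p ∈ R, ∀ q ∈ R, dihMulA n p q ∈ R) :
    ∀ x, x ∈ R ↔ x ∈ S ∨ Prod2 S n x := by
  intro x
  refine ⟨hsub x, ?_⟩
  rintro (hx | hx)
  · exact hseed x hx
  · induction hx with
    | two ha hb => exact hclosed _ (hseed _ ha) _ (hseed _ hb)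
    | snoc hx hg ih => exact hclosed _ ih _ (hseed _ hg)

theorem memR_iff_gen {S : List (Int × Int)} {n : Int} {R : List (Int × Int)}
    (hseed : ∀ x ∈ S, x ∈ R) (hsub : ∀ x ∈ R, x ∈ S ∨ Prod2 S n x)
    (hclosed : ∀ x ∈ R, ∀ g ∈ PySem.Set.ofList S, dihMulA n x g ∈ R) :
    ∀ x, x ∈ R ↔ x ∈ S ∨ Prod2 S n x := by
  intro x
  refine ⟨hsub x, ?_⟩
  have hclosed' : ∀ x ∈ R, ∀ g ∈ S, dihMulA n x g ∈ R := by
    intro x hx g hg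
    exact hclosed x hx g ((PySem.Set.mem_ofList S g).mpr hg)
  rintro (hx | hx)
  · exact hseed x hx
  · induction hx with
    | two ha hb => exact hclosed' _ (hseed _ ha) _ hb
    | snoc hx hg ih => exact hclosed' _ ih _ hg

-- ---- sorted2 of a permutation ----
def lexLE (a b : Int × Int) : Prop := a.1 < b.1 ∨ (a.1 = b.1 ∧ a.2 ≤ b.2)

theorem lexLE_antisymm {a b : Int × Int} (h1 : lexLE a b) (h2 : lexLE b a) : a = b := by
  obtain ⟨a1, a2⟩ := a; obtain ⟨b1, b2⟩ := b
  simp only [lexLE] at h1 h2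
  have : a1 = b1 ∧ a2 = b2 := by omega
  simp [this.1, this.2]

theorem before_or (a b : Int × Int) :
    ((decide (a.1 < b.1) || (!decide (b.1 < a.1) && decide (a.2 < b.2))) = true → lexLE a b) ∧
    (¬ (decide (a.1 < b.1) || (!decide (b.1 < a.1) && decide (a.2 < b.2))) = true → lexLE b a) := by
  constructor <;> intro h <;> simp only [Bool.or_eq_true, Bool.and_eq_true, Bool.not_eq_true',
    decide_eq_true_eq, decide_eq_false_iff_not] at h <;> unfold lexLE <;> omega

theorem lexLE_trans {a b c : Int × Int} (h1 : lexLE a b) (h2 : lexLE b c) : lexLE a c := by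
  unfold lexLE at *; omega

theorem insertBy_pairwise_lex (x : Int × Int) :
    ∀ (ys : List (Int × Int)), ys.Pairwise lexLE →
      (PySem.List.insertBy
        (fun a b => (decide (a.1 < b.1) || (!decide (b.1 < a.1) && decide (a.2 < b.2)))) x ys).Pairwise lexLE := by
  intro ys
  induction ys with
  | nil => simp [PySem.List.insertBy]
  | cons y ys ih =>
      intro hp
      rw [List.pairwise_cons] at hp
      show (if (decide (x.1 < y.1) || (!decide (y.1 < x.1) && decide (x.2 < y.2))) = true
            then x :: y :: ys else y :: PySem.List.insertBy _ x ys).Pairwise lexLE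
      split_ifs with h
      · refine List.pairwise_cons.mpr ⟨?_, List.pairwise_cons.mpr hp⟩
        intro z hz
        have hxy : lexLE x y := (before_or x y).1 h
        rcases List.mem_cons.mp hz with rfl | hz
        · exact hxy
        · exact lexLE_trans hxy (hp.1 z hz)
      · refine List.pairwise_cons.mpr ⟨?_, ih hp.2⟩
        intro z hz
        rcases (PySem.List.mem_insertBy
            (fun a b => (decide (a.1 < b.1) || (!decide (b.1 < a.1) && decide (a.2 < b.2))))
            x z ys).mp hz with hzx | hz
        · rw [hzx]; exact (before_or x y).2 h
        · exact hp.1 z hz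

theorem foldl_insertBy_pairwise_lex :
    ∀ (l : List (Int × Int)) (acc : List (Int × Int)), acc.Pairwise lexLE →
      (List.foldl (fun acc x => PySem.List.insertBy
        (fun a b => (decide (a.1 < b.1) || (!decide (b.1 < a.1) && decide (a.2 < b.2)))) x acc)
        acc l).Pairwise lexLE := by
  intro l
  induction l with
  | nil => exact fun acc h => h
  | cons a l ih =>
      intro acc hacc
      exact ih _ (insertBy_pairwise_lex a acc hacc)

theorem sorted2_pairwise_lex (xs : List (Int × Int)) :
    (PySem.List.sorted2 xs Prod.fst Prod.snd).Pairwise lexLE := by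
  show (List.foldl (fun acc x => PySem.List.insertBy
    (fun a b => (decide (a.1 < b.1) || (!decide (b.1 < a.1) && decide (a.2 < b.2)))) x acc)
    [] xs).Pairwise lexLE
  exact foldl_insertBy_pairwise_lex xs [] (by simp)

theorem sorted2_eq_of_perm {xs ys : List (Int × Int)} (h : xs.Perm ys) :
    PySem.List.sorted2 xs Prod.fst Prod.snd = PySem.List.sorted2 ys Prod.fst Prod.snd := by
  refine List.Perm.eq_of_pairwise (le := lexLE)
    (fun a b _ _ h1 h2 => lexLE_antisymm h1 h2)
    (sorted2_pairwise_lex xs) (sorted2_pairwise_lex ys) ?_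
  exact ((PySem.List.sorted2_perm xs Prod.fst Prod.snd false).trans h).trans
    (PySem.List.sorted2_perm ys Prod.fst Prod.snd false).symm

-- ---- the empty-generators case ----
theorem ofList_nil : PySem.Set.ofList ([] : List (Int × Int)) = [] := rfl

theorem loopA_succ (n : Int) (m : Nat) (gs : Int) (s : PySem.Set (Int × Int)) :
    loopA n (m + 1) gs s
      = if gs < PySem.Set.len s then loopA n m (PySem.Set.len s) (stepA n s) else s := rfl

theorem generate_subgroup_nil (n : Int) : generate_subgroup [] n = [] := by
  show PySem.List.sorted2
    (loopA n (([] : List (Int × Int)).length + 2 * n.natAbs + 1) 0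
      (PySem.Set.ofList ([] : List (Int × Int)))) Prod.fst Prod.snd = []
  rw [ofList_nil, loopA_succ,
    if_neg (by show ¬ (0:Int) < PySem.Set.len ([] : List (Int × Int)); decide)]
  rfl

theorem generate_subgroup_alt_nil (n : Int) : generate_subgroup_alt [] n = [] := by
  show PySem.List.sorted2
    (loopB n (PySem.Set.ofList ([] : List (Int × Int)))
      (([] : List (Int × Int)).length + 2 * n.natAbs + 1)
      (PySem.Set.ofList ([] : List (Int × Int)))
      (PySem.Set.ofList ([] : List (Int × Int)))) Prod.fst Prod.snd = []
  rw [ofList_nil, loopB_succ_nil]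
  rfl

-- ---- main ----
theorem main_equal (generators : List (Int × Int)) (n : Int)
    (hpre : Pre_generate_subgroup generators n) :
    generate_subgroup generators n = generate_subgroup_alt generators n := by
  rcases hpre with rfl | hn
  · rw [generate_subgroup_nil, generate_subgroup_alt_nil]
  · unfold generate_subgroup generate_subgroup_alt
    have hnd0 : (PySem.Set.ofList generators).Nodup := PySem.Set.nodup_ofList generators
    have hmem0 : ∀ x, x ∈ PySem.Set.ofList generators ↔ x ∈ generators :=
      fun x => PySem.Set.mem_ofList generators x
    have hinvA : InvA generators n (PySem.Set.ofList generators) :=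
      ⟨hnd0, fun x hx => (hmem0 x).mpr hx, fun x hx => Or.inl ((hmem0 x).mp hx)⟩
    have hA := loopA_spec (S := generators) hn (generators.length + 2 * n.natAbs + 1) 0
      (PySem.Set.ofList generators) hinvA
      (by positivity)
      (by
        intro hno p hp q hq
        have h0 : (PySem.Set.ofList generators).length = 0 := by omega
        rw [List.length_eq_zero_iff] at h0
        rw [h0] at hp
        cases hp)
      (by push_cast; omega)
    have hinvB : InvB generators n (PySem.Set.ofList generators) (PySem.Set.ofList generators) :=
      ⟨hnd0, hnd0, fun y hy => hy, fun x hx => (hmem0 x).mpr hx,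
        fun x hx => Or.inl ((hmem0 x).mp hx),
        fun x hx hnx _ _ => absurd hx hnx⟩
    have hB := loopB_spec (S := generators) hn (generators.length + 2 * n.natAbs + 1)
      (PySem.Set.ofList generators) (PySem.Set.ofList generators) hinvB
      (by push_cast; omega)
    obtain ⟨hBnd, hBseed, hBsub, hBclosed⟩ := hB
    obtain ⟨⟨hAnd, hAseed, hAsub⟩, hAclosed⟩ := hA
    apply sorted2_eq_of_perm
    rw [List.perm_ext_iff_of_nodup hAnd hBnd]
    intro x
    rw [memR_iff hAseed hAsub hAclosed, memR_iff_gen hBseed hBsub hBclosed]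

-- ===== VERDICT =====
theorem generate_subgroup_spec : Claim_equal_generate_subgroup := by
  intro generators n _ hpre
  exact main_equal generators n hpre
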